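-- pv_equiv track=rewrite | github.com/HoChangSUNG/programmers_python | level_1/crane_claw_machine_game.py | solution
-- ===== SOURCE A (Python) =====
-- from collections import deque
--
-- def solution(board, moves): # 크레인 인형뽑기 게임
--     answer = 0
--     stack = []
--     item = [ 0 for _ in range(len(board))]
--     queue = deque(moves)
--     for col in range(len(board)):
--         for row in range(len(board)):
--             if board[row][col] != 0:
--                 item[col] = row
--                 break
--     while queue:
--         cur_loc = queue.popleft()
--         if item[cur_loc-1] == len(board):
--             continue
--         if stack:
--             if board[item[cur_loc-1]][cur_loc-1] == stack[-1]:
--                 stack.pop()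
--                 answer +=2
--             else:
--                 stack.append(board[item[cur_loc-1]][cur_loc-1])
--             item[cur_loc-1] +=1
--         else:
--             stack.append(board[item[cur_loc-1]][cur_loc-1])
--             item[cur_loc-1] += 1
--
--     return answer
-- ===== SOURCE B (Python) =====
-- from collections import deque
--
-- def solution(board, moves):
--     n = len(board)
--     # per-column lanes: from the first non-zero row (0 if none) to the bottom
--     lanes = []
--     for c in range(n):
--         f = 0
--         for r in range(n):
--             if board[r][c] != 0:
--                 f = r
--                 break
--         lanes.append(deque(board[r][c] for r in range(f, n)))
--     # phase 1: the sequence of picked dolls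
--     picked = []
--     for m in moves:
--         if lanes[m - 1]:
--             picked.append(lanes[m - 1].popleft())
--     # phase 2: stack reduction counting burst pairs
--     answer = 0
--     stack = []
--     for x in picked:
--         if stack and stack[-1] == x:
--             stack.pop()
--             answer += 2
--         else:
--             stack.append(x)
--     return answer
-- ===== Notes on version B (the rewrite author's own statement) =====
-- stated objective: alternative
-- what changed: B precomputes each column as a queue (lane) sliced from its first non-zero row, then runs two separate phases -- first extracting the full sequence of picked dolls, then reducing that sequence with a stack to count burst pairs -- instead of A's single interleaved loop that chases per-column row pointers into the board.
-- outside the precondition, e.g. on solution([[1, 2, 5], [1, 5, 2]], [0, 2, 0, 2]): A returns 2, B returns 0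
import Mathlib
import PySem

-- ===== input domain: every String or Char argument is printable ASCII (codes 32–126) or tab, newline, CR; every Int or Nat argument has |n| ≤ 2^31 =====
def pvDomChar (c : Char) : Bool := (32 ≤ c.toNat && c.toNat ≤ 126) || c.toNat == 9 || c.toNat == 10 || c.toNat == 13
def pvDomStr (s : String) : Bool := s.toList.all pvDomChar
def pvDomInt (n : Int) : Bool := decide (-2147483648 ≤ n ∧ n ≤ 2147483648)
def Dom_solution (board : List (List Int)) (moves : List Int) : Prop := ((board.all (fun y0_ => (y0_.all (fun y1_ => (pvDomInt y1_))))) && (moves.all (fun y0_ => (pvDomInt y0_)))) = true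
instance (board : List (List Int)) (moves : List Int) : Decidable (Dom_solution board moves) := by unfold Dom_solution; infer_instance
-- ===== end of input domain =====

-- B replaces A's interleaved loop (per-column row pointers chased into the board) by per-column
-- queues sliced from the first non-zero row and two separate phases: extract the picked sequence,
-- then reduce it with a stack.  Objective: alternative decomposition; same asymptotic cost.
-- (A mutates nothing observable; both leave their arguments intact.)

-- ===== PORT A =====
-- inner 'for row … break' of A: first row with board[row][col] != 0, else the initial 0
def pvA_scan (board : List (List Int)) (col : Nat) : List Nat → Int
  | [] => 0
  | r :: rs => if (board.getD r []).getD col 0 ≠ 0 then (r : Int) else pvA_scan board col rs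

-- 'item' after the double for-loop
def pvA_item (board : List (List Int)) : List Int :=
  (List.range board.length).map (fun c => pvA_scan board c (List.range board.length))

-- the while-queue loop; state = (item, stack, answer); stack head = Python stack[-1]
def pvA_loop (board : List (List Int)) (n : Nat) : List Int → List Int → List Int → Int → Int
  | [], _, _, ans => ans
  | m :: ms, item, stack, ans =>
    let p := (PySem.List.pyGet? item (m - 1)).getD 0
    if p = (n : Int) then pvA_loop board n ms item stack ans
    else
      let x := (PySem.List.pyGet? ((PySem.List.pyGet? board p).getD []) (m - 1)).getD 0
      match stack with
      | top :: rest =>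
        if x = top then pvA_loop board n ms (PySem.List.pySetD item (m - 1) (p + 1)) rest (ans + 2)
        else pvA_loop board n ms (PySem.List.pySetD item (m - 1) (p + 1)) (x :: top :: rest) ans
      | [] => pvA_loop board n ms (PySem.List.pySetD item (m - 1) (p + 1)) [x] ans

def solution (board : List (List Int)) (moves : List Int) : Int :=
  pvA_loop board board.length moves (pvA_item board) [] 0

-- ===== PORT B =====
-- first non-zero row of a column (0 if none), as in Source B's f-loop
def pvB_first (board : List (List Int)) (c : Nat) : List Nat → Nat
  | [] => 0
  | r :: rs => if (board.getD r []).getD c 0 ≠ 0 then r else pvB_first board c rs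

-- lanes[c] = [board[r][c] for r in range(f, n)]
def pvB_lanes (board : List (List Int)) : List (List Int) :=
  (List.range board.length).map (fun c =>
    ((List.range board.length).drop (pvB_first board c (List.range board.length))).map
      (fun r => (board.getD r []).getD c 0))

-- phase 1: the sequence of picked dolls, popping lane fronts
def pvB_extract : List Int → List (List Int) → List Int
  | [], _ => []
  | m :: ms, lanes =>
    match (PySem.List.pyGet? lanes (m - 1)).getD [] with
    | [] => pvB_extract ms lanes
    | x :: rest => x :: pvB_extract ms (PySem.List.pySetD lanes (m - 1) rest)

-- phase 2: stack reduction counting burst pairs; stack head = Python stack[-1]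
def pvB_reduce : List Int → List Int → Int → Int
  | [], _, ans => ans
  | x :: xs, top :: rest, ans =>
    if top = x then pvB_reduce xs rest (ans + 2) else pvB_reduce xs (x :: top :: rest) ans
  | x :: xs, [], ans => pvB_reduce xs [x] ans

def solution_alt (board : List (List Int)) (moves : List Int) : Int :=
  pvB_reduce (pvB_extract moves (pvB_lanes board)) [] 0

-- ===== PRECONDITION & SPEC =====
-- Pre_ restricts to the puzzle's natural domain: a SQUARE board (every row of length len(board)) and
-- moves that are valid Python indices of the column list.  On ragged boards A raises IndexError (short
-- rows) or, for longer rows with wrapped moves, returns values mixing two different columns — an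
-- accident of inconsistent negative indexing; out-of-range moves raise IndexError.
def Pre_solution (board : List (List Int)) (moves : List Int) : Prop :=
  (∀ row ∈ board, row.length = board.length) ∧
  (∀ m ∈ moves, PySem.Raise.InRange board.length (m - 1))
instance (board : List (List Int)) (moves : List Int) : Decidable (Pre_solution board moves) := by
  unfold Pre_solution; infer_instance

def pvWitness_solution : List (List Int) × List Int := ([[0, 0], [1, 2]], [1, 2, 2, 1])

def Spec_solution (board : List (List Int)) (moves : List Int) (out : Int) : Prop := out = solution_alt board moves
instance (board : List (List Int)) (moves : List Int) (out : Int) : Decidable (Spec_solution board moves out) := by unfold Spec_solution; infer_instance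

-- ===== CLAIM (what is proved, stated in full; the proofs are below) =====
def Claim_equal_solution : Prop := ∀ (board : List (List Int)) (moves : List Int), Dom_solution board moves → Pre_solution board moves → Spec_solution board moves (solution board moves)

-- ===== LEMMAS AND PROOFS =====

-- the c-th column of the board, as read by both programs
def pvCol (board : List (List Int)) (c : Nat) : List Int :=
  (List.range board.length).map (fun r => (board.getD r []).getD c 0)

-- normalised Python index
def pvNorm (len : Nat) (i : Int) : Nat := (if i < 0 then i + len else i).toNat

-- state correspondence: each lane is the suffix of its column starting at the pointer
def pvInv (board : List (List Int)) (item : List Int) (lanes : List (List Int)) : Prop :=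
  item.length = board.length ∧ lanes.length = board.length ∧
  ∀ k, k < board.length →
    0 ≤ item.getD k 0 ∧ item.getD k 0 ≤ (board.length : Int) ∧
    lanes.getD k [] = (pvCol board k).drop (item.getD k 0).toNat

lemma pv_get_norm {α : Type} (xs : List α) (i : Int) (h : PySem.Raise.InRange xs.length i) :
    PySem.List.pyGet? xs i = xs[pvNorm xs.length i]? := by
  unfold PySem.Raise.InRange at h
  unfold PySem.List.pyGet? PySem.List.pyIdx? pvNorm
  split_ifs with h1 h2 h3 h4 <;> simp_all <;> congr 1 <;> omega

lemma pv_set_norm {α : Type} (xs : List α) (i : Int) (v : α) (h : PySem.Raise.InRange xs.length i) :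
    PySem.List.pySetD xs i v = xs.set (pvNorm xs.length i) v := by
  unfold PySem.Raise.InRange at h
  unfold PySem.List.pySetD PySem.List.pySet? PySem.List.pyIdx? pvNorm
  split_ifs with h1 h2 h3 h4 <;> simp_all <;> congr 1 <;> omega

lemma pv_norm_lt (len : Nat) (i : Int) (h : PySem.Raise.InRange len i) : pvNorm len i < len := by
  unfold PySem.Raise.InRange at h; unfold pvNorm; split_ifs <;> omega

lemma pv_scan_eq_first (board : List (List Int)) (c : Nat) (l : List Nat) :
    pvA_scan board c l = (pvB_first board c l : Int) := by
  induction l with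
  | nil => simp [pvA_scan, pvB_first]
  | cons r rs ih => simp only [pvA_scan, pvB_first]; split_ifs <;> simp [ih]

lemma pv_first_le (board : List (List Int)) (c : Nat) :
    pvB_first board c (List.range board.length) ≤ board.length := by
  have h : ∀ l : List Nat, pvB_first board c l = 0 ∨ pvB_first board c l ∈ l := by
    intro l
    induction l with
    | nil => left; rfl
    | cons r rs ih =>
      simp only [pvB_first]; split_ifs
      · right; exact List.mem_cons_self
      · rcases ih with h | h
        · left; exact h
        · right; exact List.mem_cons_of_mem _ h
  rcases h (List.range board.length) with h | h
  · omega
  · exact le_of_lt (List.mem_range.mp h)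

lemma pv_col_length (board : List (List Int)) (c : Nat) : (pvCol board c).length = board.length := by
  simp [pvCol]

lemma pv_drop_cons (l : List Int) (n : Nat) (h : n < l.length) :
    l.drop n = l.getD n 0 :: l.drop (n + 1) := by
  rw [List.drop_eq_getElem_cons h, List.getD_eq_getElem _ _ h]

lemma pv_col_getD (board : List (List Int)) (c : Nat) (r : Nat) (hr : r < board.length) :
    (pvCol board c).getD r 0 = (board.getD r []).getD c 0 := by
  rw [List.getD_eq_getElem _ _ (by rw [pv_col_length]; omega)]
  simp [pvCol]

-- initial states satisfy the correspondence
lemma pv_init_inv (board : List (List Int)) : pvInv board (pvA_item board) (pvB_lanes board) := by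
  refine ⟨by simp [pvA_item], by simp [pvB_lanes], ?_⟩
  intro k hk
  have hitem : (pvA_item board).getD k 0
      = (pvB_first board k (List.range board.length) : Int) := by
    rw [List.getD_eq_getElem _ _ (by simp [pvA_item]; omega)]
    simp [pvA_item, pv_scan_eq_first]
  refine ⟨by rw [hitem]; positivity, by rw [hitem]; exact_mod_cast pv_first_le board k, ?_⟩
  rw [hitem, List.getD_eq_getElem _ _ (by simp [pvB_lanes]; omega)]
  simp only [pvB_lanes, pvCol, List.getElem_map, List.getElem_range, Int.toNat_natCast,
    List.map_drop]

-- one interleaved step of A equals the extract-then-reduce composition of B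
lemma pv_main (board : List (List Int)) (hsq : ∀ row ∈ board, row.length = board.length) :
    ∀ (moves : List Int) (item : List Int) (lanes : List (List Int)) (stack : List Int) (ans : Int),
    (∀ m ∈ moves, PySem.Raise.InRange board.length (m - 1)) →
    pvInv board item lanes →
    pvA_loop board board.length moves item stack ans = pvB_reduce (pvB_extract moves lanes) stack ans := by
  intro moves
  induction moves with
  | nil => intro item lanes stack ans _ _; simp [pvA_loop, pvB_extract, pvB_reduce]
  | cons m ms ih =>
    intro item lanes stack ans hm hinv
    obtain ⟨hlen, hllen, hpt⟩ := hinv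
    have hmr : PySem.Raise.InRange board.length (m - 1) := hm m List.mem_cons_self
    have hms : ∀ y ∈ ms, PySem.Raise.InRange board.length (y - 1) :=
      fun y hy => hm y (List.mem_cons_of_mem _ hy)
    set k := pvNorm board.length (m - 1) with hkdef
    have hk : k < board.length := pv_norm_lt _ _ hmr
    obtain ⟨hp0, hpn, hlane⟩ := hpt k hk
    have hgiD : (PySem.List.pyGet? item (m - 1)).getD 0 = item.getD k 0 := by
      rw [pv_get_norm item (m - 1) (by rwa [hlen]), hlen, ← List.getD_eq_getElem?_getD]
    have hglD : (PySem.List.pyGet? lanes (m - 1)).getD [] = lanes.getD k [] := by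
      rw [pv_get_norm lanes (m - 1) (by rwa [hllen]), hllen, ← List.getD_eq_getElem?_getD]
    have hplen : ((pvCol board k).drop (item.getD k 0).toNat).length
        = board.length - (item.getD k 0).toNat := by
      simp [pv_col_length]
    by_cases hend : item.getD k 0 = (board.length : Int)
    · -- pointer at the bottom ↔ lane empty: both sides skip the move
      have hlempty : lanes.getD k [] = [] := by
        rw [hlane]; apply List.eq_nil_of_length_eq_zero; rw [hplen]; omega
      have hA : pvA_loop board board.length (m :: ms) item stack ans
          = pvA_loop board board.length ms item stack ans := by
        simp only [pvA_loop, hgiD]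
        rw [if_pos hend]
      have hB : pvB_extract (m :: ms) lanes = pvB_extract ms lanes := by
        simp only [pvB_extract, hglD, hlempty]
      rw [hA, hB]
      exact ih item lanes stack ans hms ⟨hlen, hllen, hpt⟩
    · -- pointer above the bottom: both sides pick x = board[p][column k]
      obtain ⟨p, hpq⟩ : ∃ p, item.getD k 0 = p := ⟨_, rfl⟩
      rw [hpq] at hp0 hpn hlane hgiD hplen hend
      have hplt : (p).toNat < board.length := by omega
      set x := (board.getD (p).toNat []).getD k 0 with hxdef
      have hlcons : lanes.getD k []
          = x :: (pvCol board k).drop ((p).toNat + 1) := by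
        rw [hlane, pv_drop_cons _ _ (by rw [pv_col_length]; omega), pv_col_getD board k _ hplt]
      -- A reads the same x through board[p][m-1]
      have hrow : (PySem.List.pyGet? board (p)).getD [] = board.getD (p).toNat [] := by
        rw [pv_get_norm board (p) (by unfold PySem.Raise.InRange; omega)]
        have hn : pvNorm board.length (p) = (p).toNat := by
          unfold pvNorm; split_ifs <;> omega
        rw [hn, ← List.getD_eq_getElem?_getD]
      have hrowlen : (board.getD (p).toNat []).length = board.length := by
        rw [List.getD_eq_getElem _ _ hplt]
        exact hsq _ (List.getElem_mem hplt)
      have hxA : (PySem.List.pyGet? ((PySem.List.pyGet? board (p)).getD []) (m - 1)).getD 0 = x := by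
        rw [hrow, pv_get_norm _ (m - 1) (by rwa [hrowlen]), hrowlen, ← hkdef,
          ← List.getD_eq_getElem?_getD, hxdef]
      -- the updated states still correspond
      have hinv' : pvInv board (item.set k (p + 1))
          (lanes.set k ((pvCol board k).drop ((p).toNat + 1))) := by
        refine ⟨by simp [hlen], by simp [hllen], ?_⟩
        intro j hj
        by_cases hjk : j = k
        · subst hjk
          rw [List.getD_eq_getElem _ _ (by simp; omega), List.getD_eq_getElem _ _ (by simp; omega),
            List.getElem_set_self, List.getElem_set_self]
          refine ⟨by omega, by omega, ?_⟩
          congr 1; omega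
        · have h1 : (item.set k (p + 1)).getD j 0 = item.getD j 0 := by
            rcases Nat.lt_or_ge j item.length with hj' | hj'
            · rw [List.getD_eq_getElem _ _ (by simp; omega), List.getD_eq_getElem _ _ hj',
                List.getElem_set_ne (by omega)]
            · rw [List.getD_eq_default _ _ (by simp; omega), List.getD_eq_default _ _ hj']
          have h2 : (lanes.set k ((pvCol board k).drop ((p).toNat + 1))).getD j []
              = lanes.getD j [] := by
            rcases Nat.lt_or_ge j lanes.length with hj' | hj'
            · rw [List.getD_eq_getElem _ _ (by simp; omega), List.getD_eq_getElem _ _ hj',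
                List.getElem_set_ne (by omega)]
            · rw [List.getD_eq_default _ _ (by simp; omega), List.getD_eq_default _ _ hj']
          rw [h1, h2]
          exact hpt j hj
      have hsetI : PySem.List.pySetD item (m - 1) (p + 1) = item.set k (p + 1) := by
        rw [pv_set_norm item (m - 1) _ (by rwa [hlen]), hlen]
      have hsetL : PySem.List.pySetD lanes (m - 1) ((pvCol board k).drop ((p).toNat + 1))
          = lanes.set k ((pvCol board k).drop ((p).toNat + 1)) := by
        rw [pv_set_norm lanes (m - 1) _ (by rwa [hllen]), hllen]
      have hB : pvB_extract (m :: ms) lanes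
          = x :: pvB_extract ms (lanes.set k ((pvCol board k).drop ((p).toNat + 1))) := by
        simp only [pvB_extract, hglD, hlcons, hsetL]
      rw [hB]
      match stack with
      | top :: rest =>
        by_cases hx : x = top
        · have hA : pvA_loop board board.length (m :: ms) item (top :: rest) ans
              = pvA_loop board board.length ms (item.set k (p + 1)) rest (ans + 2) := by
            simp only [pvA_loop, hgiD, hxA, hsetI]
            rw [if_neg hend, if_pos hx]
          have hBr : pvB_reduce (x :: pvB_extract ms (lanes.set k ((pvCol board k).drop ((p).toNat + 1))))
              (top :: rest) ans
              = pvB_reduce (pvB_extract ms (lanes.set k ((pvCol board k).drop ((p).toNat + 1)))) rest (ans + 2) := by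
            simp only [pvB_reduce]
            rw [if_pos hx.symm]
          rw [hA, hBr]; exact ih _ _ _ _ hms hinv'
        · have hA : pvA_loop board board.length (m :: ms) item (top :: rest) ans
              = pvA_loop board board.length ms (item.set k (p + 1)) (x :: top :: rest) ans := by
            simp only [pvA_loop, hgiD, hxA, hsetI]
            rw [if_neg hend, if_neg hx]
          have hBr : pvB_reduce (x :: pvB_extract ms (lanes.set k ((pvCol board k).drop ((p).toNat + 1))))
              (top :: rest) ans
              = pvB_reduce (pvB_extract ms (lanes.set k ((pvCol board k).drop ((p).toNat + 1)))) (x :: top :: rest) ans := by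
            simp only [pvB_reduce]
            rw [if_neg (fun h => hx h.symm)]
          rw [hA, hBr]; exact ih _ _ _ _ hms hinv'
      | [] =>
        have hA : pvA_loop board board.length (m :: ms) item [] ans
            = pvA_loop board board.length ms (item.set k (p + 1)) [x] ans := by
          simp only [pvA_loop, hgiD, hxA, hsetI]
          rw [if_neg hend]
        have hBr : pvB_reduce (x :: pvB_extract ms (lanes.set k ((pvCol board k).drop ((p).toNat + 1)))) [] ans
            = pvB_reduce (pvB_extract ms (lanes.set k ((pvCol board k).drop ((p).toNat + 1)))) [x] ans := by
          simp only [pvB_reduce]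
        rw [hA, hBr]; exact ih _ _ _ _ hms hinv'

-- ===== VERDICT (by name: the statement is the Claim_ definition above) =====
theorem solution_spec : Claim_equal_solution := by
  intro board moves _ hpre
  unfold Spec_solution solution solution_alt
  exact pv_main board hpre.1 moves (pvA_item board) (pvB_lanes board) [] 0 hpre.2 (pv_init_inv board)
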